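-- pv_equiv track=rewrite | github.com/michalPalysHub/Subnet-calculator | SubnetCalculator.py | get_mask_in_binary_from_adress
-- ===== SOURCE A (Python) =====
-- def get_mask_in_binary_from_adress(mask):
--     mask_binary = "1"*mask
--     mask_binary = mask_binary.zfill(32)[::-1]
--     mask_binary = mask_binary[:8] + "." + mask_binary[8:16] + "." + mask_binary[16:24] + "." + mask_binary[24:32]
--     mask_binary = mask_binary.split('.')
--
--     for i in range(0,4):
--         mask_binary[i] = "0b" + mask_binary[i]
--
--     return mask_binary
-- ===== SOURCE B (Python) =====
-- def get_mask_in_binary_from_adress(mask):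
--     result = []
--     for i in range(4):
--         ones = max(0, min(8, mask - 8 * i))
--         result.append("0b" + "1" * ones + "0" * (8 - ones))
--     return result
-- ===== Notes on version B (the rewrite author's own statement) =====
-- stated objective: simpler
-- what changed: Replaces A's 32-char string build / zfill / reverse / slice / split pipeline with a direct per-octet loop that computes the number of one-bits per octet arithmetically (ones = max(0, min(8, mask - 8*i))) and builds each octet string independently.
import Mathlib
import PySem

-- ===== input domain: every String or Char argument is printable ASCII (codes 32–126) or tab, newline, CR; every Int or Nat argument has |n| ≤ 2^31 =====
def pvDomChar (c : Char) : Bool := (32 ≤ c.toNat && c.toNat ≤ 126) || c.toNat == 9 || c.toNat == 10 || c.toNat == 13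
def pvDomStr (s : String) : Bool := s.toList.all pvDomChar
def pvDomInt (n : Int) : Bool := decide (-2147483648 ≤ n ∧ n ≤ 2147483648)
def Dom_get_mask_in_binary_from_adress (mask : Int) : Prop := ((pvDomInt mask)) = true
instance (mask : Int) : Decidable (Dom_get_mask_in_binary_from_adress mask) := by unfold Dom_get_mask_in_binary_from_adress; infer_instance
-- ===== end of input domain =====

-- B replaces A's 32-char pad/reverse/slice string pipeline by a per-octet arithmetic
-- count of one-bits (objective: simpler).

-- ===== PORT A =====
-- literal transliteration: "1"*mask; zfill(32); [::-1]; three slices joined with '.';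
-- split('.'); then the range(0,4) loop prefixing "0b" in place.
def get_mask_in_binary_from_adress (mask : Int) : List String :=
  let mb0 : List Char := PySem.List.pyRepeat ['1'] mask
  -- [::-1]: Python's full reverse slice is List.reverse (PySem.List.slice?_none_none_neg_one)
  let mb1 : List Char := (PySem.Chars.zfill mb0 32).reverse
  let joined : List Char :=
    PySem.List.slice mb1 none (some 8) ++ ['.'] ++
    PySem.List.slice mb1 (some 8) (some 16) ++ ['.'] ++
    PySem.List.slice mb1 (some 16) (some 24) ++ ['.'] ++
    PySem.List.slice mb1 (some 24) (some 32)
  let parts : List (List Char) := PySem.Chars.splitOn joined ['.']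
  let parts2 : List (List Char) :=
    (PySem.List.pyRange 0 4 1).foldl
      (fun acc i => acc.set i.toNat ('0' :: 'b' :: PySem.List.pyGetD acc i [])) parts
  parts2.map (fun cs => String.ofList cs)

-- ===== PORT B =====
-- literal transliteration of Source B: append "0b" + "1"*ones + "0"*(8-ones) for i in range(4).
def get_mask_in_binary_from_adress_alt (mask : Int) : List String :=
  (PySem.List.pyRange 0 4 1).foldl
    (fun result i =>
      let ones : Int := max 0 (min 8 (mask - 8 * i))
      result ++ [String.ofList ('0' :: 'b' ::
        (PySem.List.pyRepeat ['1'] ones ++ PySem.List.pyRepeat ['0'] (8 - ones)))]) []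

-- ===== PRECONDITION & SPEC =====
def Spec_get_mask_in_binary_from_adress (mask : Int) (out : List String) : Prop := out = get_mask_in_binary_from_adress_alt mask
instance (mask : Int) (out : List String) : Decidable (Spec_get_mask_in_binary_from_adress mask out) := by unfold Spec_get_mask_in_binary_from_adress; infer_instance

-- ===== CLAIM (what is proved, stated in full; the proofs are below) =====
def Claim_equal_get_mask_in_binary_from_adress : Prop := ∀ (mask : Int), Dom_get_mask_in_binary_from_adress mask → Spec_get_mask_in_binary_from_adress mask (get_mask_in_binary_from_adress mask)

-- ===== LEMMAS AND PROOFS =====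

-- Both programs' results depend on mask only through its clamp to [0, 32]:
-- below 0 they equal their value at 0, above 32 their value at 32.
lemma A_neg (mask : Int) (h : mask ≤ 0) :
    get_mask_in_binary_from_adress mask = get_mask_in_binary_from_adress 0 := by
  have h0 : get_mask_in_binary_from_adress 0
      = ["0b00000000","0b00000000","0b00000000","0b00000000"] := by decide
  rw [h0]
  unfold get_mask_in_binary_from_adress
  rw [PySem.List.pyRepeat_singleton, show mask.toNat = 0 by omega]
  decide

lemma A_ge (mask : Int) (h : 32 ≤ mask) :
    get_mask_in_binary_from_adress mask = get_mask_in_binary_from_adress 32 := by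
  obtain ⟨n, hn32, hmask⟩ : ∃ n : Nat, 32 ≤ n ∧ mask.toNat = n := ⟨mask.toNat, by omega, rfl⟩
  have h32 : get_mask_in_binary_from_adress 32
      = ["0b11111111","0b11111111","0b11111111","0b11111111"] := by decide
  rw [h32]
  unfold get_mask_in_binary_from_adress
  rw [PySem.List.pyRepeat_singleton, hmask]
  simp only [PySem.Chars.zfill, List.length_replicate]
  rw [if_pos (by exact_mod_cast hn32)]
  rw [List.reverse_replicate]
  rw [PySem.List.slice_to _ (by omega), PySem.List.slice_toNat _ (by omega) (by omega),
      PySem.List.slice_toNat _ (by omega) (by omega), PySem.List.slice_toNat _ (by omega) (by omega)]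
  simp only [List.take_replicate, List.drop_replicate]
  rw [show min (Int.toNat 8) n = 8 by omega,
      show min (Int.toNat 16 - Int.toNat 8) (n - Int.toNat 8) = 8 by omega,
      show min (Int.toNat 24 - Int.toNat 16) (n - Int.toNat 16) = 8 by omega,
      show min (Int.toNat 32 - Int.toNat 24) (n - Int.toNat 24) = 8 by omega]
  decide

lemma B_neg (mask : Int) (h : mask ≤ 0) :
    get_mask_in_binary_from_adress_alt mask = get_mask_in_binary_from_adress_alt 0 := by
  unfold get_mask_in_binary_from_adress_alt
  rw [PySem.List.foldl_append_singleton_eq_map, PySem.List.foldl_append_singleton_eq_map]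
  simp only [List.nil_append]
  apply List.map_congr_left
  intro i hi
  rw [PySem.List.mem_pyRange_one] at hi
  rw [show max 0 (min 8 (mask - 8 * i)) = 0 by omega, show max 0 (min 8 (0 - 8 * i)) = 0 by omega]

lemma B_ge (mask : Int) (h : 32 ≤ mask) :
    get_mask_in_binary_from_adress_alt mask = get_mask_in_binary_from_adress_alt 32 := by
  unfold get_mask_in_binary_from_adress_alt
  rw [PySem.List.foldl_append_singleton_eq_map, PySem.List.foldl_append_singleton_eq_map]
  simp only [List.nil_append]
  apply List.map_congr_left
  intro i hi
  rw [PySem.List.mem_pyRange_one] at hi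
  rw [show max 0 (min 8 (mask - 8 * i)) = 8 by omega, show max 0 (min 8 (32 - 8 * i)) = 8 by omega]

-- ===== VERDICT (by name: the statement is the Claim_ definition above) =====
theorem get_mask_in_binary_from_adress_spec : Claim_equal_get_mask_in_binary_from_adress := by
  intro mask _
  unfold Spec_get_mask_in_binary_from_adress
  by_cases h : mask ≤ 0
  · rw [A_neg mask h, B_neg mask h]; decide
  · by_cases h2 : 32 ≤ mask
    · rw [A_ge mask h2, B_ge mask h2]; decide
    · have hl : 1 ≤ mask := by omega
      have hr : mask ≤ 31 := by omega
      interval_cases mask <;> decide
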